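-- pv_equiv track=rewrite | github.com/01uan/retro-helpers | yugi-fm/emu.py | chain_final_atk
-- ===== SOURCE A (Python) =====
-- EQUIP_BOOST = 500  # FM equip cards give +500 ATK / +500 DEF
--
-- def chain_final_atk(chain, card_stats):
--     """Compute the final ATK of the last result in a chain (including equip boosts)."""
--     equip_counts = {}
--     last_result = None
--     for a, b, result, step_type in chain:
--         if step_type == 'fusion':
--             equip_counts.pop(a, None)
--             equip_counts.pop(b, None)
--             last_result = result
--         else:  # equip
--             equip_counts[result] = equip_counts.get(result, 0) + 1
--             last_result = result
--     base_atk = card_stats.get(last_result, (0, 0))[0]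
--     return base_atk + equip_counts.get(last_result, 0) * EQUIP_BOOST
-- ===== SOURCE B (Python) =====
-- EQUIP_BOOST = 500  # FM equip cards give +500 ATK / +500 DEF
--
-- def chain_final_atk(chain, card_stats):
--     """Backward scan: only the final result's equip count matters, so walk the
--     chain from the end, counting equips of that card, and stop at the first
--     fusion that consumed it (which would have reset the count)."""
--     if not chain:
--         return card_stats.get(None, (0, 0))[0]
--     last = chain[-1][2]
--     count = 0
--     for a, b, result, step_type in reversed(chain):
--         if step_type == 'fusion':
--             if a == last or b == last:
--                 break
--         elif result == last:
--             count += 1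
--     return card_stats.get(last, (0, 0))[0] + count * EQUIP_BOOST
-- ===== Notes on version B (the rewrite author's own statement) =====
-- stated objective: alternative
-- what changed: Replaces the forward pass that maintains a per-card equip-count dict with a backward early-stopping scan that tracks only the final result's count, stopping at the first fusion that consumed that card.
import Mathlib
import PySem

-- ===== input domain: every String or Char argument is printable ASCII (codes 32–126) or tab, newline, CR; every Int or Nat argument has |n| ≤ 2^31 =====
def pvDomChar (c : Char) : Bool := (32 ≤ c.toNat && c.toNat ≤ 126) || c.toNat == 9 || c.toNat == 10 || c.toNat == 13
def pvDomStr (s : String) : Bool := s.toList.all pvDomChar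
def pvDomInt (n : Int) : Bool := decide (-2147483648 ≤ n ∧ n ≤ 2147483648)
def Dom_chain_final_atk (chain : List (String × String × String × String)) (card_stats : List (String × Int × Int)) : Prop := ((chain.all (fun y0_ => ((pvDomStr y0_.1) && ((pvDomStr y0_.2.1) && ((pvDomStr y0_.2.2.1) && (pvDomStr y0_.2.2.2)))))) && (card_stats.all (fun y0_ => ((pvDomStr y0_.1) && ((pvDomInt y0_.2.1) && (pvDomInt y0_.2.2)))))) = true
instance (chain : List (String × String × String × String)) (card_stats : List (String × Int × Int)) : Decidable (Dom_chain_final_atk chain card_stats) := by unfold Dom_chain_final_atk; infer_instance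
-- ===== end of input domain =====

-- B replaces A's forward per-card equip-count dict with a backward early-stopping scan
-- over just the final result card (alternative decomposition; same return value).


-- ===== PORT A =====
-- one loop step of A: (equip_counts, last_result) updated by (a, b, result, step_type)
def chainStepA (acc : PySem.Dict String Int × Option String)
    (step : String × String × String × String) : PySem.Dict String Int × Option String :=
  if step.2.2.2 == "fusion" then
    (((acc.1.erase step.1).erase step.2.1), some step.2.2.1)   -- pop(a, None); pop(b, None)
  else
    (acc.1.insert step.2.2.1 (acc.1.getD step.2.2.1 0 + 1), some step.2.2.1)

def chain_final_atk (chain : List (String × String × String × String)) (card_stats : List (String × Int × Int)) : Int :=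
  let st := chain.foldl chainStepA (PySem.Dict.empty, none)
  -- card_stats.get(last_result, (0,0))[0]: last_result None never matches a String key
  let base_atk : Int := match st.2 with
    | none => 0
    | some k => ((PySem.Dict.mk card_stats).getD k (0, 0)).1
  base_atk + (match st.2 with | none => 0 | some k => st.1.getD k 0) * 500

-- ===== PORT B =====
-- the for-loop of B over the reversed chain: count equips of `last`, break at a fusion consuming it
def cntB (last : String) : List (String × String × String × String) → Int
  | [] => 0
  | (a, b, result, step_type) :: rest =>
    if step_type == "fusion" then
      (if a == last || b == last then 0 else cntB last rest)
    else
      (if result == last then 1 else 0) + cntB last rest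

def chain_final_atk_alt (chain : List (String × String × String × String)) (card_stats : List (String × Int × Int)) : Int :=
  match PySem.List.pyGet? chain (-1) with
  | none => 0   -- empty chain: card_stats.get(None, (0,0))[0] = 0 on String keys
  | some x =>
    ((PySem.Dict.mk card_stats).getD x.2.2.1 (0, 0)).1 + cntB x.2.2.1 chain.reverse * 500

-- ===== PRECONDITION & SPEC =====
def Spec_chain_final_atk (chain : List (String × String × String × String)) (card_stats : List (String × Int × Int)) (out : Int) : Prop := out = chain_final_atk_alt chain card_stats
instance (chain : List (String × String × String × String)) (card_stats : List (String × Int × Int)) (out : Int) : Decidable (Spec_chain_final_atk chain card_stats out) := by unfold Spec_chain_final_atk; infer_instance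

-- ===== CLAIM (what is proved, stated in full; the proofs are below) =====
def Claim_equal_chain_final_atk : Prop := ∀ (chain : List (String × String × String × String)) (card_stats : List (String × Int × Int)), Dom_chain_final_atk chain card_stats → Spec_chain_final_atk chain card_stats (chain_final_atk chain card_stats)

-- ===== LEMMAS AND PROOFS =====

-- lookup after erase (PySem.Dict carries no erase lemmas)
theorem find?_filter_ne_key (l : List (String × Int)) (a k : String) :
    (l.filter (fun p => !p.1 == a)).find? (fun p => p.1 == k)
      = if k = a then none else l.find? (fun p => p.1 == k) := by
  induction l with
  | nil => simp
  | cons p t ih =>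
    by_cases hpa : p.1 = a
    · have hpk : (k = a) ∨ (p.1 == k) = false := by
        by_cases hk : k = a
        · exact Or.inl hk
        · exact Or.inr (by simp [hpa]; exact fun h => hk h.symm)
      rcases hpk with hk | hpk
      · subst hk
        simp [hpa]
      · have hak : (a == k) = false := hpa ▸ hpk
        simp [hpa, hak, ih]
    · cases hpk : (p.1 == k) with
      | true =>
        simp [hpa, hpk]
        exact fun h => hpa ((eq_of_beq hpk).trans h)
      | false => simp [hpa, hpk, ih]

theorem getD_erase (d : PySem.Dict String Int) (a k : String) (v : Int) :
    (d.erase a).getD k v = if k = a then v else d.getD k v := by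
  simp only [PySem.Dict.getD, PySem.Dict.get?, PySem.Dict.erase]
  rw [find?_filter_ne_key]
  split <;> rfl

-- the second foldl component is the result field of the last step
theorem state_snd (chain : List (String × String × String × String)) :
    (chain.foldl chainStepA (PySem.Dict.empty, none)).2
      = chain.getLast?.map (fun s => s.2.2.1) := by
  induction chain using List.reverseRecOn with
  | nil => rfl
  | append_singleton xs x ih =>
    rw [List.foldl_append]
    simp [chainStepA]
    split <;> simp

-- the equip count of any card k after A's forward loop equals B's backward count
theorem state_count (chain : List (String × String × String × String)) (k : String) :
    (chain.foldl chainStepA (PySem.Dict.empty, none)).1.getD k 0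
      = cntB k chain.reverse := by
  induction chain using List.reverseRecOn with
  | nil => rfl
  | append_singleton xs x ih =>
    obtain ⟨a, b, r, ty⟩ := x
    rw [List.foldl_append, List.reverse_append]
    simp only [List.foldl_cons, List.foldl_nil, List.reverse_singleton, List.singleton_append,
      cntB, chainStepA]
    by_cases hty : (ty == "fusion") = true
    · rw [if_pos hty, if_pos hty]
      show ((((xs.foldl chainStepA (PySem.Dict.empty, none)).1.erase a).erase b).getD k 0) = _
      rw [getD_erase, getD_erase, ih]
      by_cases hka : k = a
      · subst hka
        simp
      · by_cases hkb : k = b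
        · subst hkb
          simp
        · have h1 : ¬ a = k := fun h => hka h.symm
          have h2 : ¬ b = k := fun h => hkb h.symm
          simp [hka, hkb, h1, h2]
    · rw [if_neg hty, if_neg hty]
      show (((xs.foldl chainStepA (PySem.Dict.empty, none)).1.insert r _).getD k 0) = _
      rw [PySem.Dict.getD_insert]
      by_cases hkr : k = r
      · subst hkr
        rw [if_pos rfl, ih]
        simp
        omega
      · have h1 : ¬ r = k := fun h => hkr h.symm
        rw [if_neg hkr, ih]
        simp [h1]

-- ===== VERDICT (by name: the statement is the Claim_ definition above) =====
theorem chain_final_atk_spec : Claim_equal_chain_final_atk := by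
  intro chain card_stats _
  rcases List.eq_nil_or_concat chain with h | ⟨xs, x, h⟩
  · subst h; rfl
  · subst h
    rw [List.concat_eq_append]
    show chain_final_atk (xs ++ [x]) card_stats = chain_final_atk_alt (xs ++ [x]) card_stats
    have hlast : (xs ++ [x]).getLast? = some x := by simp
    have h2 := state_snd (xs ++ [x])
    rw [hlast] at h2
    simp only [chain_final_atk, chain_final_atk_alt, h2, Option.map_some,
      PySem.List.pyGet?_neg_one_append_singleton]
    rw [state_count]
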